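-- pv_equiv track=rewrite | github.com/mixmikmic/GH_code_analysis | python/NikhiPart3.py | clusteringAlg
-- ===== SOURCE A (Python) =====
-- def clusteringAlg(ord_list, k = 0):
--     """
--     Input:
--     ord_list: The ordered list of tuples which include the
--               correlations between firms and the firms themselves
--     k: The number of iterations for the clustering algorithm
--     Output:
--     A list of sets where each set represents an individual
--     cluster
--     """
--     # Initialize the list of sets. Each set represents a cluster
--     # which initialy includes only one firm
--     sets = []
--     for i in range(len(ord_list)):
--         if not({ord_list[i][1]} in sets):
--             sets.append({ord_list[i][1]})
--         if not({ord_list[i][2]} in sets):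
--             sets.append({ord_list[i][2]})
--     # Repeat the algorithm k times
--     # In each iteration we check the k-th tuple of correlations list
--     # and whether the 2 firms in that tuple are already in the same
--     # set. If they do, we move on to the next tuple, otherwise we merge
--     for j in range(min(k, len(ord_list))):
--         nd1 = ord_list[j][1]
--         nd2 = ord_list[j][2]
--         fl1, fl2 = False, False
--         for i in range(len(sets)):
--             if (nd1 in sets[i]) and fl1 == False:
--                 idx1 = i
--                 fl1 = True
--             if (nd2 in sets[i]) and fl2 == False:
--                 idx2 = i
--                 fl2 = True
--         if idx1 != idx2:
--             sets[idx1] = sets[idx1].union(sets[idx2])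
--             sets.remove(sets[idx2])
--     return sets
-- ===== SOURCE B (Python) =====
-- def clusteringAlg(ord_list, k = 0):
--     """Same clustering, but with a firm->leader map and an insertion-ordered
--     dict of clusters, so a merge step touches only the absorbed cluster
--     instead of scanning every set."""
--     leader = {}
--     clusters = {}
--     for t in ord_list:
--         for v in (t[1], t[2]):
--             if v not in leader:
--                 leader[v] = v
--                 clusters[v] = {v}
--     for j in range(min(k, len(ord_list))):
--         a, b = ord_list[j][1], ord_list[j][2]
--         ra, rb = leader[a], leader[b]
--         if ra != rb:
--             moved = clusters.pop(rb)
--             for x in moved: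
--                 leader[x] = ra
--             clusters[ra] = clusters[ra] | moved
--     return list(clusters.values())
-- ===== Notes on version B (the rewrite author's own statement) =====
-- stated objective: faster
-- what changed: replaces A's per-merge linear scan over all cluster sets (and list-membership dedup at init) with a firm-to-leader dict plus an insertion-ordered dict of clusters keyed by leader, so each merge is two dict lookups and relabelling only the absorbed cluster
import Mathlib
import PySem

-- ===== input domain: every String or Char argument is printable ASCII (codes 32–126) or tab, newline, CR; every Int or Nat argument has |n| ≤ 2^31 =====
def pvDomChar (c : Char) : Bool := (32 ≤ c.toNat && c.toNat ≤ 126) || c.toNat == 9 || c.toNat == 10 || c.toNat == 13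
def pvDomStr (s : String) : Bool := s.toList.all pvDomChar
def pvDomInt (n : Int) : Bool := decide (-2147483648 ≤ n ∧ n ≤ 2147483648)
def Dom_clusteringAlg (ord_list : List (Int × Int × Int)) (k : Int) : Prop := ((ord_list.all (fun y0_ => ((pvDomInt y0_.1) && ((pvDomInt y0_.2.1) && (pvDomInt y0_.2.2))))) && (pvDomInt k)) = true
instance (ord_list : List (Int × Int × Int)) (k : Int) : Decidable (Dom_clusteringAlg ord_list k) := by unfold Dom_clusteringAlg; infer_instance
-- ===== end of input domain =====

-- B replaces A's per-merge linear scan over all clusters by a firm→leader map plus an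
-- insertion-ordered dict of clusters, so a merge step touches only the absorbed cluster.

-- ===== PORT A =====
-- init loop: "if not({x} in sets)" compares {x} with each set by Python set
-- equality; during this loop every element of `sets` is a singleton, so the
-- list-equality membership `sets.contains [x]` is exact here.
def pvInitA (ord_list : List (Int × Int × Int)) : List (List Int) :=
  ord_list.foldl (fun sets t =>
    let sets := if sets.contains [t.2.1] then sets else sets ++ [[t.2.1]]
    if sets.contains [t.2.2] then sets else sets ++ [[t.2.2]]) []

-- the inner scan for idx1/idx2; Python leaves idx1/idx2 unbound until the flag
-- flips — both firms always lie in some set, so the initial 0 is never read.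
def pvScanA (sets : List (List Int)) (nd1 nd2 : Int) : (Bool × Nat) × (Bool × Nat) :=
  (List.range sets.length).foldl (fun st i =>
    let st1 := if PySem.Set.contains (sets.getD i []) nd1 && !st.1.1 then ((true, i), st.2) else st
    if PySem.Set.contains (sets.getD i []) nd2 && !st1.2.1 then (st1.1, (true, i)) else st1)
    ((false, 0), (false, 0))

-- one iteration of the merge loop.  `sets.remove(sets[idx2])` removes the first
-- element set-equal to sets[idx2]; the clusters are pairwise disjoint and
-- nonempty, so the first set-equal element is the first list-equal one, namely
-- the element at idx2 itself, which is present — the `.getD sets'` fallback is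
-- never taken.  sets[idx2] is read after the idx1 update, as in the Python.
def pvStepA (ord_list : List (Int × Int × Int)) (sets : List (List Int)) (j : Nat) : List (List Int) :=
  let t := ord_list.getD j (0, 0, 0)
  let s := pvScanA sets t.2.1 t.2.2
  let idx1 := s.1.2
  let idx2 := s.2.2
  if idx1 ≠ idx2 then
    let sets' := sets.set idx1 (PySem.Set.union (sets.getD idx1 []) (sets.getD idx2 []))
    (PySem.List.remove? sets' (sets'.getD idx2 [])).getD sets'
  else sets

def clusteringAlg (ord_list : List (Int × Int × Int)) (k : Int) : List (List Int) :=
  (List.range (min k (ord_list.length : Int)).toNat).foldl (pvStepA ord_list) (pvInitA ord_list)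

-- ===== PORT B =====
def pvInitB (ord_list : List (Int × Int × Int)) : PySem.Dict Int Int × PySem.Dict Int (List Int) :=
  ord_list.foldl (fun st t =>
    let st := if st.1.contains t.2.1 then st else (st.1.insert t.2.1 t.2.1, st.2.insert t.2.1 [t.2.1])
    if st.1.contains t.2.2 then st else (st.1.insert t.2.2 t.2.2, st.2.insert t.2.2 [t.2.2]))
    (PySem.Dict.empty, PySem.Dict.empty)

-- leader[a]/leader[b] and clusters.pop(rb) never raise: every firm of ord_list is a
-- leader key, and every leader value is a clusters key — the defaults are never read.
-- The relabel loop `for x in moved: leader[x] = ra` overwrites existing keys in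
-- place, so its (hash) iteration order cannot affect the resulting dict.
def pvStepB (ord_list : List (Int × Int × Int)) (st : PySem.Dict Int Int × PySem.Dict Int (List Int)) (j : Nat) : PySem.Dict Int Int × PySem.Dict Int (List Int) :=
  let t := ord_list.getD j (0, 0, 0)
  let ra := st.1.getD t.2.1 0
  let rb := st.1.getD t.2.2 0
  if ra ≠ rb then
    let moved := st.2.getD rb []
    let clusters := st.2.erase rb
    let leader := moved.foldl (fun ld x => ld.insert x ra) st.1
    (leader, clusters.insert ra (PySem.Set.union (clusters.getD ra []) moved))
  else st

def clusteringAlg_alt (ord_list : List (Int × Int × Int)) (k : Int) : List (List Int) :=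
  ((List.range (min k (ord_list.length : Int)).toNat).foldl (pvStepB ord_list) (pvInitB ord_list)).2.values

-- ===== PRECONDITION & SPEC =====
def Spec_clusteringAlg (ord_list : List (Int × Int × Int)) (k : Int) (out : List (List Int)) : Prop := out = clusteringAlg_alt ord_list k
instance (ord_list : List (Int × Int × Int)) (k : Int) (out : List (List Int)) : Decidable (Spec_clusteringAlg ord_list k out) := by unfold Spec_clusteringAlg; infer_instance

-- ===== CLAIM (what is proved, stated in full; the proofs are below) =====
def Claim_equal_clusteringAlg : Prop := ∀ (ord_list : List (Int × Int × Int)) (k : Int), Dom_clusteringAlg ord_list k → Spec_clusteringAlg ord_list k (clusteringAlg ord_list k)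

-- ===== LEMMAS AND PROOFS =====

-- The simulation invariant between A's list of clusters and B's (leader, clusters).
def pvInv (ol : List (Int × Int × Int)) (sets : List (List Int))
    (leader : PySem.Dict Int Int) (clusters : PySem.Dict Int (List Int)) : Prop :=
  clusters.values = sets ∧
  clusters.keys.Nodup ∧
  (∀ i, i < sets.length → sets.getD i [] ≠ []) ∧
  (∀ i j, i < sets.length → j < sets.length → i ≠ j →
      ∀ x, x ∈ sets.getD i [] → x ∉ sets.getD j []) ∧
  (∀ i, i < sets.length → ∀ x, x ∈ sets.getD i [] →
      leader.get? x = some (clusters.keys.getD i 0)) ∧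
  (∀ x r, leader.get? x = some r → ∃ i, i < sets.length ∧ x ∈ sets.getD i []) ∧
  (∀ t ∈ ol, (leader.get? t.2.1).isSome ∧ (leader.get? t.2.2).isSome)

-- generic: fold two programs in lockstep, preserving a relation
theorem pvFoldlRel {σ τ ι : Type} (R : σ → τ → Prop) (f : σ → ι → σ) (g : τ → ι → τ)
    (l : List ι) (s0 : σ) (t0 : τ)
    (hstep : ∀ s t i, i ∈ l → R s t → R (f s i) (g t i)) (h0 : R s0 t0) :
    R (l.foldl f s0) (l.foldl g t0) := by
  induction l generalizing s0 t0 with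
  | nil => exact h0
  | cons a l ih =>
      exact ih _ _ (fun s t i hi => hstep s t i (List.mem_cons_of_mem _ hi))
        (hstep _ _ _ (List.mem_cons_self ..) h0)

theorem pvContains (s : PySem.Set Int) (x : Int) : PySem.Set.contains s x = true ↔ x ∈ s := by
  simp [PySem.Set.contains]

-- first-index search: the fold that records the first index where p holds
theorem pvFirstIdx_noHit (p : Nat → Bool) (n : Nat) (h : ∀ j, j < n → p j = false) :
    (List.range n).foldl (fun (st : Bool × Nat) i => if p i && !st.1 then (true, i) else st)
      (false, 0) = (false, 0) := by
  induction n with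
  | zero => rfl
  | succ n ih =>
      rw [List.range_succ, List.foldl_append, ih (fun j hj => h j (Nat.lt_succ_of_lt hj))]
      simp [h n (Nat.lt_succ_self n)]

theorem pvFirstIdx (p : Nat → Bool) (n i0 : Nat) (h : i0 < n) (hp : p i0 = true)
    (hu : ∀ j, j < n → p j = true → j = i0) :
    (List.range n).foldl (fun (st : Bool × Nat) i => if p i && !st.1 then (true, i) else st)
      (false, 0) = (true, i0) := by
  induction n with
  | zero => omega
  | succ n ih =>
      rw [List.range_succ, List.foldl_append]
      rcases Nat.lt_or_ge i0 n with hlt | hge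
      · rw [ih hlt (fun j hj hpj => hu j (Nat.lt_succ_of_lt hj) hpj)]
        simp
      · have hi0 : i0 = n := by omega
        subst hi0
        rw [pvFirstIdx_noHit]
        · simp [hp]
        · intro j hj
          by_contra hc
          have := hu j (Nat.lt_succ_of_lt hj) (by revert hc; cases p j <;> simp)
          omega

-- a fold whose components update independently decomposes into two folds
theorem pvFoldlProd {σ τ ι : Type} (f : σ → ι → σ) (g : τ → ι → τ) (l : List ι) (s0 : σ) (t0 : τ) :
    l.foldl (fun st i => (f st.1 i, g st.2 i)) (s0, t0) = (l.foldl f s0, l.foldl g t0) := by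
  induction l generalizing s0 t0 with
  | nil => rfl
  | cons a l ih => simpa using ih (f s0 a) (g t0 a)

-- the combined scan decomposes into two independent first-index searches
theorem pvScanA_eq (sets : List (List Int)) (nd1 nd2 : Int) :
    pvScanA sets nd1 nd2 =
      ((List.range sets.length).foldl
          (fun (st : Bool × Nat) i => if PySem.Set.contains (sets.getD i []) nd1 && !st.1 then (true, i) else st) (false, 0),
       (List.range sets.length).foldl
          (fun (st : Bool × Nat) i => if PySem.Set.contains (sets.getD i []) nd2 && !st.1 then (true, i) else st) (false, 0)) := by
  unfold pvScanA
  rw [← pvFoldlProd]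
  congr 1
  funext st i
  rcases st with ⟨⟨f1, i1⟩, f2, i2⟩
  dsimp only []
  split_ifs <;> rfl

-- get? after a constant-value relabel fold
theorem pvGetFoldlInsert (xs : List Int) (d : PySem.Dict Int Int) (r y : Int) :
    (xs.foldl (fun ld x => ld.insert x r) d).get? y =
      if y ∈ xs then some r else d.get? y := by
  induction xs generalizing d with
  | nil => simp
  | cons x xs ih =>
      simp only [List.foldl_cons, ih]
      by_cases hy : y ∈ xs
      · simp [hy]
      · by_cases hyx : y = x
        · subst hyx; simp [hy, PySem.Dict.get?_insert_self]
        · simp [hy, hyx, PySem.Dict.get?_insert_of_ne _ _ hyx]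

-- lookup in a dict whose items are a tabulation of f over xs
theorem pvFindMap {ν : Type} (xs : List Int) (f : Int → ν) (y : Int) :
    Option.map (fun p => p.2) (List.find? (fun p => p.1 == y) (xs.map (fun x => (x, f x)))) =
      if y ∈ xs then some (f y) else none := by
  induction xs with
  | nil => simp
  | cons x xs ih =>
      by_cases hxy : x = y
      · subst hxy; simp
      · have hb : (x == y) = false := by simp [hxy]
        simp only [List.map_cons, List.find?_cons, hb, ih, List.mem_cons]
        simp [Ne.symm hxy]

theorem pvDictGetMap {ν : Type} (d : PySem.Dict Int ν) (xs : List Int) (f : Int → ν)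
    (h : d.items = xs.map (fun x => (x, f x))) (y : Int) :
    d.get? y = if y ∈ xs then some (f y) else none := by
  simp only [PySem.Dict.get?, h]
  exact pvFindMap xs f y

-- idxOf? finds the stated first occurrence
theorem pvIdxOf (l : List (List Int)) (v : List Int) (i : Nat) (hi : i < l.length)
    (hv : l[i] = v) (hprev : ∀ j, (hj : j < i) → l[j]'(by omega) ≠ v) :
    List.idxOf? v l = some i := by
  induction l generalizing i with
  | nil => simp at hi
  | cons a l ih =>
      cases i with
      | zero =>
          simp at hv
          simp [List.idxOf?_cons, hv]
      | succ i =>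
          have ha : a ≠ v := by
            have := hprev 0 (by omega)
            simpa using this
          have : (a == v) = false := by simp [ha]
          rw [List.idxOf?_cons, this]
          simp only [Bool.false_eq_true, if_false]
          rw [ih i (by simpa using hi) (by simpa using hv)
            (fun j hj => by have := hprev (j+1) (by omega); simpa using this)]
          rfl

-- filtering out one key of a nodup association list is eraseIdx at its position
theorem pvFilterNe {ν : Type} (l : List (Int × ν)) (i : Nat) (hi : i < l.length)
    (hnd : (l.map Prod.fst).Nodup) :
    l.filter (fun p => !(p.1 == (l[i].1))) = l.eraseIdx i := by
  induction l generalizing i with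
  | nil => simp at hi
  | cons a l ih =>
      simp only [List.map_cons, List.nodup_cons] at hnd
      cases i with
      | zero =>
          simp only [List.getElem_cons_zero, List.eraseIdx_cons_zero, List.filter_cons]
          have : (a.1 == a.1) = true := by simp
          simp only [this, Bool.not_true, Bool.false_eq_true, if_false]
          apply List.filter_eq_self.mpr
          intro p hp
          have : p.1 ≠ a.1 := by
            intro hc
            exact hnd.1 (hc ▸ List.mem_map_of_mem hp)
          simp [this]
      | succ i =>
          have hlen : i < l.length := by simpa using hi
          have hane : a.1 ≠ l[i].1 := by
            intro hc
            exact hnd.1 (hc ▸ List.mem_map_of_mem (List.getElem_mem hlen))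
          simp only [List.getElem_cons_succ, List.eraseIdx_cons_succ, List.filter_cons]
          have : (a.1 == l[i].1) = false := by simp [hane]
          simp only [this, Bool.not_false, if_true]
          rw [ih i hlen hnd.2]

-- ---- initialisation phase ----

def pvInitRel (xs : List Int) (sets : List (List Int))
    (leader : PySem.Dict Int Int) (clusters : PySem.Dict Int (List Int)) : Prop :=
  xs.Nodup ∧ sets = xs.map (fun x => [x]) ∧
  leader.items = xs.map (fun x => (x, x)) ∧ clusters.items = xs.map (fun x => (x, [x]))

theorem pvInitStep (xs : List Int) (sets : List (List Int)) (leader : PySem.Dict Int Int)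
    (clusters : PySem.Dict Int (List Int)) (h : pvInitRel xs sets leader clusters) (v : Int) :
    (sets.contains [v] = leader.contains v) ∧
    pvInitRel (PySem.Set.add xs v)
      (if sets.contains [v] then sets else sets ++ [[v]])
      (if leader.contains v then leader else leader.insert v v)
      (if leader.contains v then clusters else clusters.insert v [v]) := by
  obtain ⟨hnd, hs, hl, hc⟩ := h
  have hmemA : sets.contains [v] = decide (v ∈ xs) := by
    subst hs
    simp
  have hmemB : leader.contains v = decide (v ∈ xs) := by
    rw [PySem.Dict.contains_eq_isSome_get?, pvDictGetMap leader xs id hl]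
    by_cases hv : v ∈ xs <;> simp [hv]
  have hmemC : clusters.contains v = decide (v ∈ xs) := by
    rw [PySem.Dict.contains_eq_isSome_get?, pvDictGetMap clusters xs (fun x => [x]) hc]
    by_cases hv : v ∈ xs <;> simp [hv]
  refine ⟨by rw [hmemA, hmemB], ?_⟩
  by_cases hv : v ∈ xs
  · have hadd : PySem.Set.add xs v = xs := by
      simp [PySem.Set.add, PySem.Set.contains, hv]
    simp only [hmemA, hmemB, hv, decide_true, if_true, hadd]
    exact ⟨hnd, hs, hl, hc⟩
  · have hadd : PySem.Set.add xs v = xs ++ [v] := by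
      simp [PySem.Set.add, PySem.Set.contains, hv]
    have hfalse : (decide (v ∈ xs)) = false := by simp [hv]
    simp only [hmemA, hmemB, hfalse, hadd]
    rw [if_neg Bool.false_ne_true, if_neg Bool.false_ne_true, if_neg Bool.false_ne_true]
    refine ⟨by simp [List.nodup_append, hnd]; intro a ha hav; exact hv (hav ▸ ha), by simp [hs], ?_, ?_⟩
    · rw [PySem.Dict.items_insert_of_not_contains _ _ (by rw [hmemB]; simp [hv]), hl]
      simp
    · rw [PySem.Dict.items_insert_of_not_contains _ _ (by rw [hmemC]; simp [hv]), hc]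
      simp

theorem pvMemAdd (xs : List Int) (v x : Int) (h : x ∈ xs) : x ∈ PySem.Set.add xs v := by
  simp [PySem.Set.add]
  split_ifs <;> simp [h]

theorem pvMemAddSelf (xs : List Int) (v : Int) : v ∈ PySem.Set.add xs v := by
  simp only [PySem.Set.add]
  split_ifs with hc
  · exact (pvContains xs v).mp hc
  · simp

theorem pvInitAux (l : List (Int × Int × Int)) (xs : List Int) (sets : List (List Int))
    (leader : PySem.Dict Int Int) (clusters : PySem.Dict Int (List Int))
    (h : pvInitRel xs sets leader clusters) :
    ∃ xs',
      pvInitRel xs'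
        (l.foldl (fun sets t =>
          let sets := if sets.contains [t.2.1] then sets else sets ++ [[t.2.1]]
          if sets.contains [t.2.2] then sets else sets ++ [[t.2.2]]) sets)
        (l.foldl (fun st t =>
          let st := if st.1.contains t.2.1 then st else (st.1.insert t.2.1 t.2.1, st.2.insert t.2.1 [t.2.1])
          if st.1.contains t.2.2 then st else (st.1.insert t.2.2 t.2.2, st.2.insert t.2.2 [t.2.2]))
          (leader, clusters)).1
        (l.foldl (fun st t =>
          let st := if st.1.contains t.2.1 then st else (st.1.insert t.2.1 t.2.1, st.2.insert t.2.1 [t.2.1])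
          if st.1.contains t.2.2 then st else (st.1.insert t.2.2 t.2.2, st.2.insert t.2.2 [t.2.2]))
          (leader, clusters)).2 ∧
      (∀ x ∈ xs, x ∈ xs') ∧ (∀ t ∈ l, t.2.1 ∈ xs' ∧ t.2.2 ∈ xs') := by
  induction l generalizing xs sets leader clusters with
  | nil => exact ⟨xs, h, fun x hx => hx, by simp⟩
  | cons t l ih =>
      obtain ⟨hg1, h1⟩ := pvInitStep xs sets leader clusters h t.2.1
      have hg1' : (if leader.contains t.2.1 then (leader, clusters)
          else (leader.insert t.2.1 t.2.1, clusters.insert t.2.1 [t.2.1])) =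
          ((if leader.contains t.2.1 then leader else leader.insert t.2.1 t.2.1),
           (if leader.contains t.2.1 then clusters else clusters.insert t.2.1 [t.2.1])) := by
        split_ifs <;> rfl
      obtain ⟨hg2, h2⟩ := pvInitStep _ _ _ _ h1 t.2.2
      obtain ⟨xs', hrel, hmono, hcov⟩ := ih _ _ _ _ h2
      refine ⟨xs', ?_, ?_, ?_⟩
      · simp only [List.foldl_cons]
        rw [hg1] at *
        convert hrel using 3 <;> (rw [hg1']; split_ifs <;> simp_all) 
      · intro x hx
        exact hmono x (pvMemAdd _ _ _ (pvMemAdd _ _ _ hx))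
      · intro u hu
        rcases List.mem_cons.mp hu with rfl | hu
        · exact ⟨hmono _ (pvMemAdd _ _ _ (pvMemAddSelf _ _)), hmono _ (pvMemAddSelf _ _)⟩
        · exact hcov u hu

theorem pvInitRel_toInv (ol : List (Int × Int × Int)) (xs : List Int) (sets : List (List Int))
    (leader : PySem.Dict Int Int) (clusters : PySem.Dict Int (List Int))
    (h : pvInitRel xs sets leader clusters)
    (hcov : ∀ t ∈ ol, t.2.1 ∈ xs ∧ t.2.2 ∈ xs) :
    pvInv ol sets leader clusters := by
  obtain ⟨hnd, hs, hl, hc⟩ := h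
  have hkeys : clusters.keys = xs := by
    simp [PySem.Dict.keys, hc, Function.comp_def]
  have hlen : sets.length = xs.length := by simp [hs]
  have hget : ∀ i, (hi : i < xs.length) → sets.getD i [] = [xs[i]] := by
    intro i hi
    rw [List.getD_eq_getElem _ _ (by omega)]
    subst hs
    simp
  refine ⟨?_, ?_, ?_, ?_, ?_, ?_, ?_⟩
  · simp [PySem.Dict.values, hc, hs, Function.comp_def]
  · rw [hkeys]; exact hnd
  · intro i hi; rw [hget i (by omega)]; simp
  · intro i j hi hj hij x hxi hxj
    rw [hget i (by omega)] at hxi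
    rw [hget j (by omega)] at hxj
    simp only [List.mem_singleton] at hxi hxj
    exact hij (hnd.getElem_inj_iff.mp (by rw [← hxi, ← hxj]))
  · intro i hi x hx
    rw [hget i (by omega)] at hx
    simp only [List.mem_singleton] at hx
    subst hx
    rw [pvDictGetMap leader xs id hl, hkeys,
      List.getD_eq_getElem _ _ (by omega : i < xs.length)]
    have hmem : xs[i]'(by omega) ∈ xs := List.getElem_mem _
    simp [hmem]
  · intro x r hx
    rw [pvDictGetMap leader xs id hl] at hx
    split_ifs at hx with hmem
    · obtain ⟨i, hi, hxi⟩ := List.mem_iff_getElem.mp hmem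
      exact ⟨i, by omega, by rw [hget i (by omega)]; simp [hxi]⟩
  · intro t ht
    rw [pvDictGetMap leader xs id hl, pvDictGetMap leader xs id hl]
    simp [(hcov t ht).1, (hcov t ht).2]

theorem pvInit_sim (ol : List (Int × Int × Int)) :
    pvInv ol (pvInitA ol) (pvInitB ol).1 (pvInitB ol).2 := by
  have h0 : pvInitRel [] [] PySem.Dict.empty PySem.Dict.empty := by
    refine ⟨List.nodup_nil, by simp, ?_, ?_⟩ <;> rfl
  obtain ⟨xs', hrel, _, hcov⟩ := pvInitAux ol [] [] PySem.Dict.empty PySem.Dict.empty h0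
  exact pvInitRel_toInv ol xs' _ _ _ hrel hcov

-- ---- one merge step ----

theorem pvMapEraseIdx {α β : Type} (f : α → β) (l : List α) (i : Nat) :
    (l.eraseIdx i).map f = (l.map f).eraseIdx i := by
  induction l generalizing i with
  | nil => simp
  | cons a l ih =>
      cases i with
      | zero => simp
      | succ i => simp [ih]

-- the index in the old list that position jx of the merged list came from
def pvPhi (i2 jx : Nat) : Nat := if jx < i2 then jx else jx + 1

theorem pvPhi_spec (i2 jx : Nat) :
    (jx < i2 ∧ pvPhi i2 jx = jx) ∨ (¬ jx < i2 ∧ pvPhi i2 jx = jx + 1) := by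
  unfold pvPhi
  split_ifs with h <;> simp [h]

-- the position a surviving old index i takes after the erase at i2
def pvPsi (i2 i : Nat) : Nat := if i < i2 then i else i - 1

theorem pvPsi_spec (i2 i : Nat) :
    (i < i2 ∧ pvPsi i2 i = i) ∨ (¬ i < i2 ∧ pvPsi i2 i = i - 1) := by
  unfold pvPsi
  split_ifs with h <;> simp [h]

theorem pvGetDMap {α β : Type} (f : α → β) (l : List α) (i : Nat) (hi : i < l.length)
    (d : β) (dd : α) : (l.map f).getD i d = f (l.getD i dd) := by
  rw [List.getD_eq_getElem _ _ (by simpa using hi), List.getElem_map,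
    List.getD_eq_getElem _ _ hi]

theorem pvGetDEraseIdx {α : Type} (l : List α) (i2 jx : Nat) (h2 : i2 < l.length)
    (hjx : jx < l.length - 1) (d : α) :
    (l.eraseIdx i2).getD jx d = l.getD (pvPhi i2 jx) d := by
  have hlen : (l.eraseIdx i2).length = l.length - 1 := by
    rw [List.length_eraseIdx]
    simp [h2]
  rcases pvPhi_spec i2 jx with ⟨h, he⟩ | ⟨h, he⟩
  · rw [he, List.getD_eq_getElem _ _ (by omega), List.getElem_eraseIdx, dif_pos h,
      List.getD_eq_getElem _ _ (by omega)]
  · rw [he, List.getD_eq_getElem _ _ (by omega), List.getElem_eraseIdx, dif_neg h,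
      List.getD_eq_getElem _ _ (by omega)]

theorem pvStep_sim (ol : List (Int × Int × Int)) (sets : List (List Int))
    (st : PySem.Dict Int Int × PySem.Dict Int (List Int)) (j : Nat) (hj : j < ol.length)
    (h : pvInv ol sets st.1 st.2) :
    pvInv ol (pvStepA ol sets j) (pvStepB ol st j).1 (pvStepB ol st j).2 := by
  obtain ⟨leader, clusters⟩ := st
  obtain ⟨h1, h2, h3, h4, h5, h6, h7⟩ := h
  replace h1 : clusters.values = sets := h1
  replace h2 : clusters.keys.Nodup := h2
  replace h5 : ∀ i, i < sets.length → ∀ x, x ∈ sets.getD i [] →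
      leader.get? x = some (clusters.keys.getD i 0) := h5
  replace h6 : ∀ x r, leader.get? x = some r → ∃ i, i < sets.length ∧ x ∈ sets.getD i [] := h6
  replace h7 : ∀ t ∈ ol, (leader.get? t.2.1).isSome = true ∧ (leader.get? t.2.2).isSome = true := h7
  have hvlen : clusters.items.length = sets.length := by
    have := congrArg List.length h1
    simpa [PySem.Dict.values] using this
  have hklen : clusters.keys.length = sets.length := by simp [PySem.Dict.keys, hvlen]
  have htmem : ol.getD j (0,0,0) ∈ ol := by
    rw [List.getD_eq_getElem _ _ hj]; exact List.getElem_mem _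
  -- locate a firm's (unique) cluster
  have locate : ∀ x, (leader.get? x).isSome →
      ∃ i, i < sets.length ∧ x ∈ sets.getD i [] ∧
        leader.get? x = some (clusters.keys.getD i 0) ∧
        (∀ i', i' < sets.length → x ∈ sets.getD i' [] → i' = i) := by
    intro x hx
    obtain ⟨r, hr⟩ := Option.isSome_iff_exists.mp hx
    obtain ⟨i, hi, hxi⟩ := h6 x r hr
    refine ⟨i, hi, hxi, h5 i hi x hxi, ?_⟩
    intro i' hi' hxi'
    by_contra hne
    exact h4 i' i hi' hi hne x hxi' hxi
  obtain ⟨i1, hi1, hmem1, hget1, huniq1⟩ := locate _ (h7 _ htmem).1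
  obtain ⟨i2, hi2, hmem2, hget2, huniq2⟩ := locate _ (h7 _ htmem).2
  -- the scan finds exactly those indices
  have hscan : pvScanA sets (ol.getD j (0,0,0)).2.1 (ol.getD j (0,0,0)).2.2
      = ((true, i1), (true, i2)) := by
    rw [pvScanA_eq]
    rw [pvFirstIdx _ _ i1 hi1 ((pvContains _ _).mpr hmem1)
      (fun j' hj' hp => huniq1 j' hj' ((pvContains _ _).mp hp)),
      pvFirstIdx _ _ i2 hi2 ((pvContains _ _).mpr hmem2)
      (fun j' hj' hp => huniq2 j' hj' ((pvContains _ _).mp hp))]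
  have hra : leader.getD (ol.getD j (0,0,0)).2.1 0 = clusters.keys.getD i1 0 := by
    rw [PySem.Dict.getD_eq_get?_getD, hget1]
    rfl
  have hrb : leader.getD (ol.getD j (0,0,0)).2.2 0 = clusters.keys.getD i2 0 := by
    rw [PySem.Dict.getD_eq_get?_getD, hget2]
    rfl
  by_cases hij : i1 = i2
  · -- the two firms already share a cluster: both sides do nothing
    have hA : pvStepA ol sets j = sets := by
      simp only [pvStepA]
      rw [hscan]
      simp [hij]
    have hB : pvStepB ol (leader, clusters) j = (leader, clusters) := by
      simp only [pvStepB]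
      rw [hra, hrb]
      simp [hij]
    rw [hA, hB]
    exact ⟨h1, h2, h3, h4, h5, h6, h7⟩
  · -- genuine merge
    have hkgd : ∀ i, (hi : i < sets.length) →
        clusters.keys.getD i 0 = clusters.keys[i]'(by omega) :=
      fun i hi => List.getD_eq_getElem _ _ (by omega)
    have hrane : clusters.keys.getD i1 0 ≠ clusters.keys.getD i2 0 := by
      rw [hkgd i1 hi1, hkgd i2 hi2]
      intro he
      exact hij (h2.getElem_inj_iff.mp he)
    have hitem : ∀ i, (hi : i < sets.length) →
        clusters.items.getD i (0, []) = (clusters.keys.getD i 0, sets.getD i []) := by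
      intro i hi
      have hk : clusters.keys.getD i 0 = (clusters.items.getD i (0, [])).1 := by
        show (clusters.items.map _).getD i 0 = _
        rw [pvGetDMap _ _ i (by omega) 0 (0, [])]
      have hv : sets.getD i [] = (clusters.items.getD i (0, [])).2 := by
        conv_lhs => rw [← h1]
        show (clusters.items.map _).getD i [] = _
        rw [pvGetDMap _ _ i (by omega) [] (0, [])]
      rw [hk, hv]
    set merged := PySem.Set.union (sets.getD i1 []) (sets.getD i2 []) with hmergeddef
    -- the absorbed cluster is looked up correctly
    have hmoved : clusters.getD (clusters.keys.getD i2 0) [] = sets.getD i2 [] := by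
      apply PySem.Dict.getD_of_mem_items _ _ h2
      rw [← hitem i2 hi2, List.getD_eq_getElem _ _ (by omega)]
      exact List.getElem_mem _
    -- erasing rb erases position i2 of the items
    have herase : (clusters.erase (clusters.keys.getD i2 0)).items
        = clusters.items.eraseIdx i2 := by
      show clusters.items.filter _ = _
      have h21 : clusters.keys.getD i2 0 = (clusters.items[i2]'(by omega)).1 := by
        rw [← List.getD_eq_getElem clusters.items ((0,[]) : Int × List Int) (by omega),
          hitem i2 hi2]
      rw [h21]
      exact pvFilterNe _ _ (by omega) h2
    have heklen : ((clusters.erase (clusters.keys.getD i2 0)).items).length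
        = sets.length - 1 := by
      rw [herase, List.length_eraseIdx, if_pos (by omega), hvlen]
    have hekeys : (clusters.erase (clusters.keys.getD i2 0)).keys
        = clusters.keys.eraseIdx i2 := by
      show ((clusters.erase (clusters.keys.getD i2 0)).items).map _ = _
      rw [herase, pvMapEraseIdx]
      rfl
    have heknd : (clusters.erase (clusters.keys.getD i2 0)).keys.Nodup := by
      rw [hekeys]
      exact h2.sublist (List.eraseIdx_sublist _ _)
    -- ra's cluster inside the erased dict
    have hpos : pvPsi i2 i1 < sets.length - 1 := by
      rcases pvPsi_spec i2 i1 with ⟨h, he⟩ | ⟨h, he⟩ <;> omega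
    have hphi1 : pvPhi i2 (pvPsi i2 i1) = i1 := by
      rcases pvPsi_spec i2 i1 with ⟨h, he⟩ | ⟨h, he⟩ <;>
        rcases pvPhi_spec i2 (pvPsi i2 i1) with ⟨h', he'⟩ | ⟨h', he'⟩ <;> omega
    have hmem1' : (clusters.keys.getD i1 0, sets.getD i1 [])
        ∈ (clusters.erase (clusters.keys.getD i2 0)).items := by
      rw [herase, ← hitem i1 hi1]
      have he := pvGetDEraseIdx clusters.items i2 (pvPsi i2 i1) (by omega) (by omega) (0, [])
      rw [hphi1] at he
      rw [← he, List.getD_eq_getElem _ _ (by rw [List.length_eraseIdx, if_pos (by omega)]; omega)]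
      exact List.getElem_mem _
    have hget1' : (clusters.erase (clusters.keys.getD i2 0)).getD (clusters.keys.getD i1 0) []
        = sets.getD i1 [] :=
      PySem.Dict.getD_of_mem_items _ hmem1' heknd []
    have hcont1 : (clusters.erase (clusters.keys.getD i2 0)).contains (clusters.keys.getD i1 0)
        = true := by
      rw [PySem.Dict.contains_iff_mem_keys]
      exact PySem.Dict.mem_keys_of_mem_items _ hmem1'
    -- the B step, computed
    have hstepB : pvStepB ol (leader, clusters) j =
        (((sets.getD i2 []).foldl (fun ld x => ld.insert x (clusters.keys.getD i1 0)) leader),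
         (clusters.erase (clusters.keys.getD i2 0)).insert (clusters.keys.getD i1 0) merged) := by
      simp only [pvStepB]
      rw [hra, hrb]
      rw [if_pos hrane]
      rw [hmoved, hget1']
    -- the A step, computed
    have hsets' : ∀ ix, (hix : ix < sets.length) → (sets.set i1 merged).getD ix []
        = if ix = i1 then merged else sets.getD ix [] := by
      intro ix hix
      rw [List.getD_eq_getElem _ _ (by simpa using hix), List.getElem_set]
      split_ifs with hc hc' hc'
      · rfl
      · omega
      · omega
      · rw [List.getD_eq_getElem _ _ hix]
    have hnonempty : ∀ ix, ix < sets.length → ∃ y, y ∈ sets.getD ix [] := by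
      intro ix hix
      rcases List.exists_mem_of_ne_nil _ (h3 ix hix) with ⟨y, hy⟩
      exact ⟨y, hy⟩
    have hremove : PySem.List.remove? (sets.set i1 merged) ((sets.set i1 merged).getD i2 [])
        = some ((sets.set i1 merged).eraseIdx i2) := by
      have htgt : (sets.set i1 merged).getD i2 [] = sets.getD i2 [] := by
        rw [hsets' i2 hi2, if_neg (Ne.symm hij)]
      rw [htgt]
      unfold PySem.List.remove?
      rw [pvIdxOf _ _ i2 (by simpa using hi2)
        (by rw [← List.getD_eq_getElem _ ([] : List Int), hsets' i2 hi2, if_neg (Ne.symm hij)])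
        ?_]
      · rfl
      · intro jx hjx
        have hjlt : jx < sets.length := by omega
        rw [← List.getD_eq_getElem _ ([] : List Int), hsets' jx hjlt]
        split_ifs with hc
        · intro he
          obtain ⟨y, hy⟩ := hnonempty i1 hi1
          have hym : y ∈ merged := (PySem.Set.mem_union _ _ _).mpr (Or.inl hy)
          rw [he] at hym
          exact h4 i1 i2 hi1 hi2 hij y hy hym
        · intro he
          obtain ⟨y, hy⟩ := hnonempty jx hjlt
          have hyne : jx ≠ i2 := by omega
          have : y ∈ sets.getD i2 [] := he ▸ hy
          exact h4 jx i2 hjlt hi2 hyne y hy this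
    have hstepA : pvStepA ol sets j = (sets.set i1 merged).eraseIdx i2 := by
      simp only [pvStepA]
      rw [hscan]
      simp only []
      rw [if_pos hij]
      rw [hremove]
      rfl
    rw [hstepA, hstepB]
    -- shapes of the new dict
    have hitemsN : ((clusters.erase (clusters.keys.getD i2 0)).insert (clusters.keys.getD i1 0) merged).items
        = (clusters.items.eraseIdx i2).map
            (fun p => if p.1 == clusters.keys.getD i1 0 then (clusters.keys.getD i1 0, merged) else p) := by
      rw [PySem.Dict.items_insert_of_contains _ _ hcont1, herase]
    have hlenN : ((clusters.erase (clusters.keys.getD i2 0)).insert (clusters.keys.getD i1 0) merged).items.length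
        = sets.length - 1 := by
      rw [hitemsN, List.length_map, List.length_eraseIdx, if_pos (by omega), hvlen]
    have hitemN : ∀ jx, (hjx : jx < sets.length - 1) →
        ((clusters.erase (clusters.keys.getD i2 0)).insert (clusters.keys.getD i1 0) merged).items.getD jx (0, [])
          = (clusters.keys.getD (pvPhi i2 jx) 0,
             if pvPhi i2 jx = i1 then merged else sets.getD (pvPhi i2 jx) []) := by
      intro jx hjx
      have hφlt : pvPhi i2 jx < sets.length := by
        rcases pvPhi_spec i2 jx with ⟨h, he⟩ | ⟨h, he⟩ <;> omega
      rw [hitemsN, pvGetDMap _ _ jx (by rw [List.length_eraseIdx, if_pos (by omega), hvlen]; omega) _ (0, []),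
        pvGetDEraseIdx clusters.items i2 jx (by omega) (by omega) (0, []), hitem _ hφlt]
      by_cases hc : pvPhi i2 jx = i1
      · rw [hc]
        simp
      · have hkne : (clusters.keys.getD (pvPhi i2 jx) 0 == clusters.keys.getD i1 0) = false := by
          rw [hkgd _ hφlt, hkgd _ hi1]
          simp only [beq_eq_false_iff_ne, ne_eq]
          intro he
          exact hc (h2.getElem_inj_iff.mp he)
        rw [if_neg (by rw [hkne]; exact Bool.false_ne_true), if_neg hc]
    have hlenA : ((sets.set i1 merged).eraseIdx i2).length = sets.length - 1 := by
      rw [List.length_eraseIdx]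
      simp [hi2]
    have hgetA : ∀ jx, (hjx : jx < sets.length - 1) →
        ((sets.set i1 merged).eraseIdx i2).getD jx []
          = (if pvPhi i2 jx = i1 then merged else sets.getD (pvPhi i2 jx) []) := by
      intro jx hjx
      have hφlt : pvPhi i2 jx < sets.length := by
        rcases pvPhi_spec i2 jx with ⟨h, he⟩ | ⟨h, he⟩ <;> omega
      rw [pvGetDEraseIdx (sets.set i1 merged) i2 jx (by simpa using hi2) (by simpa using hjx) [],
        hsets' _ hφlt]
    have hkeq : ((clusters.erase (clusters.keys.getD i2 0)).insert (clusters.keys.getD i1 0) merged).keys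
        = (clusters.erase (clusters.keys.getD i2 0)).keys := by
      have hm : (((clusters.erase (clusters.keys.getD i2 0)).insert (clusters.keys.getD i1 0) merged).items).map (fun x => x.1)
          = ((clusters.erase (clusters.keys.getD i2 0)).items).map (fun x => x.1) := by
        rw [hitemsN, herase, List.map_map]
        apply List.map_congr_left
        intro p hp
        by_cases hc : (p.1 == clusters.keys.getD i1 0) = true
        · simp only [Function.comp_apply, hc, if_true]
          exact (eq_of_beq hc).symm
        · simp only [Function.comp_apply, hc]
          simp
      exact hm
    have hkeysN : ∀ jx, (hjx : jx < sets.length - 1) →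
        ((clusters.erase (clusters.keys.getD i2 0)).insert (clusters.keys.getD i1 0) merged).keys.getD jx 0
          = clusters.keys.getD (pvPhi i2 jx) 0 := by
      intro jx hjx
      rw [hkeq, hekeys, pvGetDEraseIdx _ i2 jx (by omega) (by omega) 0]
    -- the new leader lookups
    have hleadN : ∀ y, ((sets.getD i2 []).foldl (fun ld x => ld.insert x (clusters.keys.getD i1 0)) leader).get? y
        = if y ∈ sets.getD i2 [] then some (clusters.keys.getD i1 0) else leader.get? y :=
      fun y => pvGetFoldlInsert _ _ _ _
    -- membership in the merged cluster
    have hmergemem : ∀ y, y ∈ merged ↔ y ∈ sets.getD i1 [] ∨ y ∈ sets.getD i2 [] := by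
      intro y
      rw [hmergeddef]
      exact PySem.Set.mem_union _ _ _
    have hφfacts : ∀ jx, jx < sets.length - 1 → pvPhi i2 jx < sets.length ∧ pvPhi i2 jx ≠ i2 := by
      intro jx hjx
      rcases pvPhi_spec i2 jx with ⟨h, he⟩ | ⟨h, he⟩ <;> constructor <;> omega
    -- now the seven invariant clauses
    refine ⟨?_, ?_, ?_, ?_, ?_, ?_, ?_⟩
    · -- values agree
      apply List.ext_getElem
      · simp only [PySem.Dict.values, List.length_map]
        rw [hlenN, hlenA]
      · intro jx hjl hjr
        have hjx : jx < sets.length - 1 := by rwa [hlenA] at hjr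
        rw [← List.getD_eq_getElem _ ([] : List Int) hjl,
          ← List.getD_eq_getElem _ ([] : List Int) hjr, hgetA jx hjx]
        simp only [PySem.Dict.values]
        rw [pvGetDMap _ _ jx (by omega) [] ((0,[]) : Int × List Int), hitemN jx hjx]
    · -- keys nodup
      rw [hkeq]
      exact heknd
    · -- nonemptiness
      intro ix hix
      have hix' : ix < sets.length - 1 := by rwa [hlenA] at hix
      rw [hgetA ix hix']
      have hφ := hφfacts ix hix'
      split_ifs with hc
      · obtain ⟨y, hy⟩ := hnonempty i1 hi1
        intro he
        have hym : y ∈ merged := (hmergemem y).mpr (Or.inl hy)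
        rw [he] at hym
        simp at hym
      · exact h3 _ hφ.1
    · -- pairwise disjoint
      intro ix jy hix hjy hne x hxi hxj
      have hix' : ix < sets.length - 1 := by rwa [hlenA] at hix
      have hjy' : jy < sets.length - 1 := by rwa [hlenA] at hjy
      rw [hgetA ix hix'] at hxi
      rw [hgetA jy hjy'] at hxj
      have hφi := hφfacts ix hix'
      have hφj := hφfacts jy hjy'
      have hφne : pvPhi i2 ix ≠ pvPhi i2 jy := by
        rcases pvPhi_spec i2 ix with ⟨h, he⟩ | ⟨h, he⟩ <;>
          rcases pvPhi_spec i2 jy with ⟨h', he'⟩ | ⟨h', he'⟩ <;> omega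
      split_ifs at hxi with hci
      · rcases (hmergemem x).mp hxi with hx1 | hx2
        · split_ifs at hxj with hcj
          · exact hφne (hci.trans hcj.symm)
          · exact h4 i1 _ hi1 hφj.1 (fun he => hφne (hci.trans he)) x hx1 hxj
        · split_ifs at hxj with hcj
          · exact hφne (hci.trans hcj.symm)
          · exact h4 i2 _ hi2 hφj.1 (fun he => hφj.2 he.symm) x hx2 hxj
      · split_ifs at hxj with hcj
        · rcases (hmergemem x).mp hxj with hx1 | hx2
          · exact h4 _ i1 hφi.1 hi1 (fun he => hφne (he.trans hcj.symm)) x hxi hx1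
          · exact h4 _ i2 hφi.1 hi2 hφi.2 x hxi hx2
        · exact h4 _ _ hφi.1 hφj.1 hφne x hxi hxj
    · -- leader points at the surviving key
      intro ix hix x hx
      have hix' : ix < sets.length - 1 := by rwa [hlenA] at hix
      rw [hgetA ix hix'] at hx
      rw [hkeysN ix hix', hleadN x]
      have hφ := hφfacts ix hix'
      split_ifs at hx with hc
      · rcases (hmergemem x).mp hx with hx1 | hx2
        · have hnotin : x ∉ sets.getD i2 [] := h4 i1 i2 hi1 hi2 hij x hx1
          rw [if_neg hnotin, h5 i1 hi1 x hx1, hc]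
        · rw [if_pos hx2, hc]
      · have hnotin : x ∉ sets.getD i2 [] := h4 _ i2 hφ.1 hi2 hφ.2 x hx
        rw [if_neg hnotin]
        exact h5 _ hφ.1 x hx
    · -- every leader entry lies in some cluster
      intro x r hxr
      rw [hleadN x] at hxr
      split_ifs at hxr with hc
      · refine ⟨pvPsi i2 i1, by rw [hlenA]; omega, ?_⟩
        rw [hgetA _ hpos, hphi1, if_pos rfl]
        exact (hmergemem x).mpr (Or.inr hc)
      · obtain ⟨i, hi, hxi⟩ := h6 x r hxr
        have hine : i ≠ i2 := fun he => hc (he ▸ hxi)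
        have hjx' : pvPsi i2 i < sets.length - 1 := by
          rcases pvPsi_spec i2 i with ⟨h, he⟩ | ⟨h, he⟩ <;> omega
        have hφeq : pvPhi i2 (pvPsi i2 i) = i := by
          rcases pvPsi_spec i2 i with ⟨h, he⟩ | ⟨h, he⟩ <;>
            rcases pvPhi_spec i2 (pvPsi i2 i) with ⟨h', he'⟩ | ⟨h', he'⟩ <;> omega
        refine ⟨pvPsi i2 i, by rw [hlenA]; omega, ?_⟩
        rw [hgetA _ hjx', hφeq]
        by_cases hci : i = i1
        · rw [if_pos hci]
          exact (hmergemem x).mpr (Or.inl (hci ▸ hxi))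
        · rw [if_neg hci]
          exact hxi
    · -- coverage of the firms in ord_list
      intro u hu
      constructor <;> rw [hleadN] <;> split_ifs <;>
        simp [(h7 u hu).1, (h7 u hu).2]

-- ===== VERDICT (by name: the statement is the Claim_ definition above) =====
theorem clusteringAlg_spec : Claim_equal_clusteringAlg := by
  intro ol k _
  unfold Spec_clusteringAlg clusteringAlg clusteringAlg_alt
  have hle : (min k (ol.length : Int)).toNat ≤ ol.length := by omega
  have hrel := pvFoldlRel (fun sets st => pvInv ol sets st.1 st.2) (pvStepA ol) (pvStepB ol)
      (List.range (min k (ol.length : Int)).toNat) (pvInitA ol) (pvInitB ol)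
      (fun s t i hi hR => pvStep_sim ol s t i (lt_of_lt_of_le (List.mem_range.mp hi) hle) hR)
      (pvInit_sim ol)
  have hv : pvInv ol ((List.range (min k (ol.length : Int)).toNat).foldl (pvStepA ol) (pvInitA ol))
      ((List.range (min k (ol.length : Int)).toNat).foldl (pvStepB ol) (pvInitB ol)).1
      ((List.range (min k (ol.length : Int)).toNat).foldl (pvStepB ol) (pvInitB ol)).2 := hrel
  exact hv.1.symm
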